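-- pv_equiv track=rewrite | github.com/alexandraback/datacollection | solutions_5738606668808192_0/Python/waitingkuo0527/main.py | _convert
-- ===== SOURCE A (Python) =====
-- def _convert(s, base):
--     result = 0
--     cur = 1
--     for ch in reversed(s):
--         if ch == '1':
--             result += cur
--         cur *= base
--
--     return result
-- ===== SOURCE B (Python) =====
-- def _convert(s, base):
--     result = 0
--     for ch in s:
--         result = result * base + (1 if ch == '1' else 0)
--     return result
-- ===== Notes on version B (the rewrite author's own statement) =====
-- stated objective: faster
-- what changed: Forward left-to-right Horner evaluation with a single accumulator replaces A's reversed traversal that maintains a separate running place-value variable cur = base^i.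
import Mathlib
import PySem

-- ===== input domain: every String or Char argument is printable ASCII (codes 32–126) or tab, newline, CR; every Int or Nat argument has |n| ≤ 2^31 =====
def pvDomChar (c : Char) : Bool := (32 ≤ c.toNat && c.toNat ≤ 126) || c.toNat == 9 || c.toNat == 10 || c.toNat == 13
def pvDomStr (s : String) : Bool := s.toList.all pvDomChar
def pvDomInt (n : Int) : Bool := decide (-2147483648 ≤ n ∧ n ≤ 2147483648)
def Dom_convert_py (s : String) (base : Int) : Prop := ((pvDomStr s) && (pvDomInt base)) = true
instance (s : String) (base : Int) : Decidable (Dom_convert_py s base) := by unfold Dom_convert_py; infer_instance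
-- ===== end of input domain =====

-- B rewrites A's reversed traversal (running place-value) as a forward Horner fold (idiomatic).

-- ===== PORT A =====
-- reversed(s) loop keeping (result, cur); branch order as in the Python.
def convert_py (s : String) (base : Int) : Int :=
  (s.toList.reverse.foldl
    (fun (st : Int × Int) ch =>
      ((if ch == '1' then st.1 + st.2 else st.1), st.2 * base))
    (0, 1)).1

-- ===== PORT B =====
def convert_py_alt (s : String) (base : Int) : Int :=
  s.toList.foldl (fun result ch => result * base + (if ch == '1' then 1 else 0)) 0

-- ===== PRECONDITION & SPEC =====
def Spec_convert_py (s : String) (base : Int) (out : Int) : Prop := out = convert_py_alt s base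
instance (s : String) (base : Int) (out : Int) : Decidable (Spec_convert_py s base out) := by unfold Spec_convert_py; infer_instance

-- ===== CLAIM (what is proved, stated in full; the proofs are below) =====
def Claim_equal_convert_py : Prop := ∀ (s : String) (base : Int), Dom_convert_py s base → Spec_convert_py s base (convert_py s base)

-- ===== LEMMAS AND PROOFS =====

def pvInd (ch : Char) : Int := if ch == '1' then 1 else 0

-- Horner fold from an arbitrary accumulator.
theorem horner_init (base : Int) (l : List Char) (a : Int) :
    l.foldl (fun result ch => result * base + pvInd ch) a
      = a * base ^ l.length + l.foldl (fun result ch => result * base + pvInd ch) 0 := by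
  induction l generalizing a with
  | nil => simp
  | cons c t ih =>
    simp only [List.foldl_cons, List.length_cons]
    rw [ih (a * base + pvInd c), ih (0 * base + pvInd c)]
    ring

theorem rev_fold (base : Int) (l : List Char) (r cur : Int) :
    l.reverse.foldl
      (fun (st : Int × Int) ch =>
        ((if ch == '1' then st.1 + st.2 else st.1), st.2 * base))
      (r, cur)
      = (r + cur * l.foldl (fun result ch => result * base + pvInd ch) 0,
         cur * base ^ l.length) := by
  induction l generalizing r cur with
  | nil => simp
  | cons c t ih =>
    simp only [List.reverse_cons, List.foldl_append, List.foldl_cons, List.foldl_nil,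
      List.length_cons]
    rw [ih]
    rw [horner_init base t (0 * base + pvInd c)]
    by_cases h : c == '1' <;>
      simp only [h, pvInd, if_true, if_false, Prod.mk.injEq, Bool.false_eq_true] <;>
      constructor <;> ring

-- ===== VERDICT (by name: the statement is the Claim_ definition above) =====
theorem convert_py_spec : Claim_equal_convert_py := by
  intro s base _
  unfold Spec_convert_py convert_py convert_py_alt
  rw [rev_fold]
  simp [pvInd]
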